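-- pv_equiv track=rewrite | github.com/collective/collective.encrypted | collective/encrypted/sharing.py | merge_search_results
-- ===== SOURCE A (Python) =====
-- def merge_search_results(results, key):
--     """Merge member search results.
--
--     Based on PlonePAS.browser.search.PASSearchView.merge.
--     """
--     output={}
--     for entry in results:
--         id=entry[key]
--         if id not in output:
--             output[id]=entry.copy()
--         else:
--             buf=entry.copy()
--             buf.update(output[id])
--             output[id]=buf
--
--     return output.values()
-- ===== SOURCE B (Python) =====
-- def merge_search_results(results, key):
--     """Merge member search results: group entries by id first, then merge each
--     group, earliest entry winning per field."""
--     groups = {}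
--     for entry in results:
--         groups.setdefault(entry[key], []).append(entry)
--     merged = {}
--     for id, group in groups.items():
--         buf = dict(group[0])
--         for entry in group[1:]:
--             later = dict(entry)
--             later.update(buf)
--             buf = later
--         merged[id] = buf
--     return merged.values()
-- ===== Notes on version B (the rewrite author's own statement) =====
-- stated objective: alternative
-- what changed: Replaces A's single incremental fold (merging each entry into a running output dict) with a two-pass decomposition: first group entries by their key value into an insertion-ordered index, then merge each group independently and collect the results.
import Mathlib
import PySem

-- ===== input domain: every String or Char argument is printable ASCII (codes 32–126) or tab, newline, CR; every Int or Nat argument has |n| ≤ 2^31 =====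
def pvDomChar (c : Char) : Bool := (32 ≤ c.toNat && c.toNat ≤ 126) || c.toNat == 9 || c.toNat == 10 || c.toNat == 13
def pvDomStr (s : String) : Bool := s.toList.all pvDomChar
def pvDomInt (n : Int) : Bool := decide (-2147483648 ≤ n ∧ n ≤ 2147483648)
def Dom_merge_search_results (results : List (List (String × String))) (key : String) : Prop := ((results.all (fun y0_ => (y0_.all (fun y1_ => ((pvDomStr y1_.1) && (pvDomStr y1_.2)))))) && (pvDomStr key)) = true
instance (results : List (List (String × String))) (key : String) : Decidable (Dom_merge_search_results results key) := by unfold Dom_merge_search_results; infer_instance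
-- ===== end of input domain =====

-- B re-decomposes A's single incremental fold as group-by-id then merge-each-group (objective: alternative, same cost).

-- ===== PORT A =====
-- A: one pass; output[id] is created from the first entry with that id, and each later
-- entry is merged underneath it (buf = entry.copy(); buf.update(output[id])).
def merge_search_results (results : List (List (String × String))) (key : String) : List (List (String × String)) :=
  let output : PySem.Dict String (PySem.Dict String String) :=
    results.foldl (fun output entry =>
      let e := PySem.Dict.mk entry
      match e.get? key with
      | none => output            -- Python raises KeyError here; excluded by Pre_
      | some id =>
        match output.get? id with
        | none => output.insert id e
        | some existing => output.insert id (e.update existing.items)) PySem.Dict.empty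
  output.values.map PySem.Dict.items

-- ===== PORT B =====
-- merge one group: start from its first entry, fold the later ones underneath
def pvMergeGroup (g : List (List (String × String))) : PySem.Dict String String :=
  match g with
  | [] => PySem.Dict.empty   -- unreachable: every group is created non-empty
  | x :: rest => rest.foldl (fun buf entry => (PySem.Dict.mk entry).update buf.items) (PySem.Dict.mk x)

def merge_search_results_alt (results : List (List (String × String))) (key : String) : List (List (String × String)) :=
  let groups : PySem.Dict String (List (List (String × String))) :=
    results.foldl (fun g entry =>
      match (PySem.Dict.mk entry).get? key with
      | none => g                 -- Python raises KeyError here; excluded by Pre_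
      | some id =>
        match g.get? id with      -- groups.setdefault(id, []).append(entry)
        | some l => g.insert id (l ++ [entry])
        | none => g.insert id [entry]) PySem.Dict.empty
  let merged : PySem.Dict String (PySem.Dict String String) :=
    groups.items.foldl (fun m p => m.insert p.1 (pvMergeGroup p.2)) PySem.Dict.empty
  merged.values.map PySem.Dict.items

-- ===== PRECONDITION & SPEC =====
-- Pre_ excludes (a) inputs where some entry lacks `key` — Python A raises KeyError there —
-- and (b) entries whose association list has duplicate keys: those are not a faithful image
-- of a Python dict (the parameter's type), so both ports' behaviour there is an artefact of
-- the list representation, not of either Python program.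
def Pre_merge_search_results (results : List (List (String × String))) (key : String) : Prop :=
  ∀ entry ∈ results, (entry.map Prod.fst).Nodup ∧ key ∈ entry.map Prod.fst
instance (results : List (List (String × String))) (key : String) : Decidable (Pre_merge_search_results results key) := by unfold Pre_merge_search_results; infer_instance

def pvWitness_merge_search_results : (List (List (String × String))) × String :=
  ([[("id", "1"), ("name", "a")], [("id", "1"), ("mail", "b")], [("id", "2"), ("name", "c")]], "id")

def Spec_merge_search_results (results : List (List (String × String))) (key : String) (out : List (List (String × String))) : Prop := out = merge_search_results_alt results key
instance (results : List (List (String × String))) (key : String) (out : List (List (String × String))) : Decidable (Spec_merge_search_results results key out) := by unfold Spec_merge_search_results; infer_instance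

-- ===== CLAIM (what is proved, stated in full; the proofs are below) =====
def Claim_equal_merge_search_results : Prop := ∀ (results : List (List (String × String))) (key : String), Dom_merge_search_results results key → Pre_merge_search_results results key → Spec_merge_search_results results key (merge_search_results results key)

-- ===== LEMMAS AND PROOFS =====

-- the value-wise map relating A's running dict to B's groups dict
def pvMapVal (g : PySem.Dict String (List (List (String × String)))) : PySem.Dict String (PySem.Dict String String) :=
  PySem.Dict.mk (g.items.map (fun p => (p.1, pvMergeGroup p.2)))

theorem pvMapVal_get? (g : PySem.Dict String (List (List (String × String)))) (id : String) :
    (pvMapVal g).get? id = (g.get? id).map pvMergeGroup := by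
  simp [pvMapVal, PySem.Dict.get?, List.find?_map, Function.comp_def, Option.map_map]

theorem pvMapVal_contains (g : PySem.Dict String (List (List (String × String)))) (id : String) :
    (pvMapVal g).contains id = g.contains id := by
  simp [pvMapVal, PySem.Dict.contains, List.any_map, Function.comp_def]

theorem pvMapVal_insert (g : PySem.Dict String (List (List (String × String)))) (id : String)
    (v : List (List (String × String))) :
    pvMapVal (g.insert id v) = (pvMapVal g).insert id (pvMergeGroup v) := by
  simp only [PySem.Dict.insert, pvMapVal_contains]
  by_cases h : g.contains id = true
  · simp [pvMapVal, h, List.map_map, Function.comp_def]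
    intro a b _
    by_cases hp : a = id <;> simp [hp]
  · simp [pvMapVal, h]

theorem pvMergeGroup_snoc (l : List (List (String × String))) (entry : List (String × String)) :
    pvMergeGroup (l ++ [entry]) = (PySem.Dict.mk entry).update (pvMergeGroup l).items := by
  cases l with
  | nil => simp [pvMergeGroup, PySem.Dict.update, PySem.Dict.empty]
  | cons x rest => simp [pvMergeGroup, List.foldl_append]

-- the two folds agree, value-wise, from related states
theorem pvLoop_eq (results : List (List (String × String))) (key : String)
    (o : PySem.Dict String (PySem.Dict String String))
    (g : PySem.Dict String (List (List (String × String)))) (h : o = pvMapVal g) :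
    results.foldl (fun output entry =>
      let e := PySem.Dict.mk entry
      match e.get? key with
      | none => output
      | some id =>
        match output.get? id with
        | none => output.insert id e
        | some existing => output.insert id (e.update existing.items)) o
    = pvMapVal (results.foldl (fun g entry =>
      match (PySem.Dict.mk entry).get? key with
      | none => g
      | some id =>
        match g.get? id with
        | some l => g.insert id (l ++ [entry])
        | none => g.insert id [entry]) g) := by
  induction results generalizing o g with
  | nil => simpa using h
  | cons entry rest ih =>
    simp only [List.foldl_cons]
    apply ih
    cases hk : (PySem.Dict.mk entry).get? key with
    | none => simpa using h
    | some id =>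
      cases hg : g.get? id with
      | none => simp [h, pvMapVal_get?, hg, pvMapVal_insert, pvMergeGroup]
      | some l => simp [h, pvMapVal_get?, hg, pvMapVal_insert, pvMergeGroup_snoc]

-- B's groups dict has unique keys (it is built by inserts from empty)
theorem pvGroups_nodup_keys (results : List (List (String × String))) (key : String)
    (g : PySem.Dict String (List (List (String × String)))) (h : g.keys.Nodup) :
    (results.foldl (fun g entry =>
      match (PySem.Dict.mk entry).get? key with
      | none => g
      | some id =>
        match g.get? id with
        | some l => g.insert id (l ++ [entry])
        | none => g.insert id [entry]) g).keys.Nodup := by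
  induction results generalizing g with
  | nil => simpa using h
  | cons entry rest ih =>
    simp only [List.foldl_cons]
    apply ih
    cases hk : (PySem.Dict.mk entry).get? key with
    | none => simpa using h
    | some id =>
      cases hg : g.get? id with
      | none => simp only [hg]; exact PySem.Dict.nodup_keys_insert _ _ _ h
      | some l => simp only [hg]; exact PySem.Dict.nodup_keys_insert _ _ _ h

-- ===== VERDICT (by name: the statement is the Claim_ definition above) =====
theorem merge_search_results_spec : Claim_equal_merge_search_results := by
  intro results key _ _
  unfold Spec_merge_search_results merge_search_results merge_search_results_alt
  dsimp only
  rw [pvLoop_eq results key PySem.Dict.empty PySem.Dict.empty rfl]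
  set G := results.foldl _ (PySem.Dict.empty : PySem.Dict String (List (List (String × String)))) with hG
  have hnd : G.keys.Nodup := pvGroups_nodup_keys results key PySem.Dict.empty (by simp [PySem.Dict.empty, PySem.Dict.keys])
  have hfresh : ∀ p ∈ G.items, (PySem.Dict.empty : PySem.Dict String (PySem.Dict String String)).contains p.1 = false := by
    intro p _; exact PySem.Dict.contains_empty _
  have := PySem.Dict.items_foldl_insert_fresh G.items Prod.fst (fun p => pvMergeGroup p.2) PySem.Dict.empty hfresh hnd
  simp only [PySem.Dict.values, this, pvMapVal]
  simp [PySem.Dict.empty, List.map_map, Function.comp_def]
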